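-- pv_equiv track=rewrite | github.com/pingyuer/BanditPM | tools/preprocess_echonet.py | detect_split_column
-- ===== SOURCE A (Python) =====
-- def detect_split_column(fieldnames: list[str]) -> str:
--     candidates = [name for name in fieldnames if name.strip().lower() == "split"]
--     if candidates:
--         return candidates[0]
--     fuzzy = [name for name in fieldnames if "split" in name.strip().lower()]
--     if fuzzy:
--         return fuzzy[0]
--     raise ValueError(f"Could not identify split column from headers: {fieldnames}")
-- ===== SOURCE B (Python) =====
-- def detect_split_column(fieldnames: list[str]) -> str:
--     first_fuzzy = None
--     for name in fieldnames:
--         s = name.strip().lower()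
--         if s == "split":
--             return name
--         if first_fuzzy is None and "split" in s:
--             first_fuzzy = name
--     if first_fuzzy is not None:
--         return first_fuzzy
--     raise ValueError(f"Could not identify split column from headers: {fieldnames}")
-- ===== Notes on version B (the rewrite author's own statement) =====
-- stated objective: simpler
-- what changed: Replaces the two list-comprehension passes (exact then fuzzy) by a single loop that returns immediately on an exact match and remembers only the first fuzzy match.
import Mathlib
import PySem

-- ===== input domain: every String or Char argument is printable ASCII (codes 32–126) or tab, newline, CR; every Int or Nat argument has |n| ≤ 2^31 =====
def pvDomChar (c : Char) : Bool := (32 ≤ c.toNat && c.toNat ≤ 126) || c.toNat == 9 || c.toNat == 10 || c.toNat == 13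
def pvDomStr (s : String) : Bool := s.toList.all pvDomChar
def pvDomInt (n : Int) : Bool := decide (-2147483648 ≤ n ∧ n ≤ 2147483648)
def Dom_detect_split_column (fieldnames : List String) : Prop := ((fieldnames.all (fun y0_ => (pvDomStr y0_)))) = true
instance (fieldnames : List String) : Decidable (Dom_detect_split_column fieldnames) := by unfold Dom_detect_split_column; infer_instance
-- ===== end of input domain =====

-- B replaces A's two filter passes by one loop with early return on an exact match
-- and a remembered first fuzzy match (objective: simpler).

-- ===== PORT A =====
-- name.strip().lower() == "split"
def pvExact (name : String) : Bool :=
  PySem.Str.lower (PySem.Str.strip name) == "split"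

-- "split" in name.strip().lower()
def pvFuzzy (name : String) : Bool :=
  PySem.Str.isIn "split" (PySem.Str.lower (PySem.Str.strip name))

def detect_split_column (fieldnames : List String) : String :=
  let candidates := fieldnames.filter pvExact
  match candidates with
  | c :: _ => c
  | [] =>
    let fuzzy := fieldnames.filter pvFuzzy
    match fuzzy with
    | c :: _ => c
    | [] => ""   -- Python raises ValueError here; excluded by Pre_

-- ===== PORT B =====
-- single pass: return on first exact match, remember first fuzzy match
def pvAltLoop (names : List String) (firstFuzzy : Option String) : String :=
  match names with
  | [] =>
    match firstFuzzy with
    | some x => x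
    | none => ""   -- Python raises ValueError here; excluded by Pre_
  | name :: rest =>
    let s := PySem.Str.lower (PySem.Str.strip name)
    if s == "split" then name
    else if firstFuzzy.isNone && PySem.Str.isIn "split" s then pvAltLoop rest (some name)
    else pvAltLoop rest firstFuzzy

def detect_split_column_alt (fieldnames : List String) : String :=
  pvAltLoop fieldnames none

-- ===== PRECONDITION & SPEC =====
-- Pre_ excludes exactly the inputs where A raises ValueError (no header whose
-- stripped lowercase form contains "split"); B raises the same error there.
def Pre_detect_split_column (fieldnames : List String) : Prop :=
  ∃ n ∈ fieldnames, PySem.Str.isIn "split" (PySem.Str.lower (PySem.Str.strip n)) = true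
instance (fieldnames : List String) : Decidable (Pre_detect_split_column fieldnames) := by
  unfold Pre_detect_split_column; infer_instance

def pvWitness_detect_split_column : List String := ["id", " Split ", "file"]

def Spec_detect_split_column (fieldnames : List String) (out : String) : Prop := out = detect_split_column_alt fieldnames
instance (fieldnames : List String) (out : String) : Decidable (Spec_detect_split_column fieldnames out) := by unfold Spec_detect_split_column; infer_instance

-- ===== CLAIM (what is proved, stated in full; the proofs are below) =====
def Claim_equal_detect_split_column : Prop := ∀ (fieldnames : List String), Dom_detect_split_column fieldnames → Pre_detect_split_column fieldnames → Spec_detect_split_column fieldnames (detect_split_column fieldnames)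

-- ===== LEMMAS AND PROOFS =====

-- an exact match is also a fuzzy match
theorem pvExact_fuzzy {n : String} (h : pvExact n = true) : pvFuzzy n = true := by
  unfold pvExact at h
  unfold pvFuzzy
  rw [eq_of_beq h]
  decide

-- B's loop computes A's two-pass result, with an already-found fuzzy candidate taking precedence
theorem pvAltLoop_eq (fs : List String) (fz : Option String) :
    pvAltLoop fs fz =
      match fs.filter pvExact with
      | c :: _ => c
      | [] =>
        match fz with
        | some x => x
        | none =>
          match fs.filter pvFuzzy with
          | c :: _ => c
          | [] => "" := by
  induction fs generalizing fz with
  | nil => cases fz <;> rfl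
  | cons n rest ih =>
    by_cases he : pvExact n = true
    · have hf := pvExact_fuzzy he
      simp [pvAltLoop, List.filter_cons, pvExact] at he ⊢
      simp [he]
    · have he' : (PySem.Str.lower (PySem.Str.strip n) == "split") = false := by
        simpa [pvExact] using he
      by_cases hf : pvFuzzy n = true
      · have hf' : PySem.Str.isIn "split" (PySem.Str.lower (PySem.Str.strip n)) = true := by
          simpa [pvFuzzy] using hf
        cases fz with
        | none =>
          simp only [pvAltLoop, he', hf', Option.isNone_none, Bool.true_and, if_false,
            Bool.false_eq_true, if_true]
          rw [ih]
          simp [he, hf]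
        | some x =>
          simp only [pvAltLoop, he', Option.isNone_some, Bool.false_and, if_false,
            Bool.false_eq_true]
          rw [ih]
          simp [he]
      · have hf' : PySem.Str.isIn "split" (PySem.Str.lower (PySem.Str.strip n)) = false := by
          simpa [pvFuzzy] using hf
        simp only [pvAltLoop, he', hf', Bool.and_false, Bool.false_eq_true, if_false]
        rw [ih]
        have hfz : pvFuzzy n = false := hf'
        simp [List.filter_cons, hfz, he]

-- ===== VERDICT (by name: the statement is the Claim_ definition above) =====
theorem detect_split_column_spec : Claim_equal_detect_split_column := by
  intro fs _ _
  unfold Spec_detect_split_column detect_split_column detect_split_column_alt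
  rw [pvAltLoop_eq]
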